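-- pv_equiv track=rewrite | github.com/reschandreas/AdventOfCode | 2024/07/main.py | is_second_correct_order
-- ===== SOURCE A (Python) =====
-- from typing import List
--
-- def is_second_correct_order(result: int, parts: List[int], operators: List[str], acc: int) -> bool:
--     if len(parts) == 0:
--         return result == acc
--     operator: str = operators.pop(0)
--     right: int = parts.pop(0)
--     if operator == '*':
--         acc *= right
--     elif operator == '+':
--         acc += right
--     elif operator == '||':
--         acc = int(str(int(acc)) + str(right))
--     if acc > result:
--         return False
--     if len(operators) == 0:
--         return acc == result
--     return is_second_correct_order(result, parts, operators, acc)
-- ===== SOURCE B (Python) =====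
-- def is_second_correct_order(result, parts, operators, acc):
--     # Non-mutating rewrite: single pass over zip(operators, parts) instead of
--     # recursion with pop(0).  (A mutates its list arguments; B does not —
--     # the equivalence proved is about the return value only.)
--     if not parts:
--         return result == acc
--     for i, (op, right) in enumerate(zip(operators, parts)):
--         if op == '*':
--             acc = acc * right
--         elif op == '+':
--             acc = acc + right
--         elif op == '||':
--             acc = int(str(acc) + str(right))
--         if acc > result:
--             return False
--         if i + 1 == len(operators):
--             return acc == result
--     return result == acc
-- ===== Notes on version B (the rewrite author's own statement) =====
-- stated objective: alternative
-- what changed: Recursion with destructive pop(0) on both lists is replaced by a non-mutating single for-loop over enumerate(zip(operators, parts)) with the same early exits; B does not mutate its arguments.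
-- outside the precondition, e.g. on is_second_correct_order(0, [5, -1], ['+', '||'], 1): A returns False, B returns False
import Mathlib
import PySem

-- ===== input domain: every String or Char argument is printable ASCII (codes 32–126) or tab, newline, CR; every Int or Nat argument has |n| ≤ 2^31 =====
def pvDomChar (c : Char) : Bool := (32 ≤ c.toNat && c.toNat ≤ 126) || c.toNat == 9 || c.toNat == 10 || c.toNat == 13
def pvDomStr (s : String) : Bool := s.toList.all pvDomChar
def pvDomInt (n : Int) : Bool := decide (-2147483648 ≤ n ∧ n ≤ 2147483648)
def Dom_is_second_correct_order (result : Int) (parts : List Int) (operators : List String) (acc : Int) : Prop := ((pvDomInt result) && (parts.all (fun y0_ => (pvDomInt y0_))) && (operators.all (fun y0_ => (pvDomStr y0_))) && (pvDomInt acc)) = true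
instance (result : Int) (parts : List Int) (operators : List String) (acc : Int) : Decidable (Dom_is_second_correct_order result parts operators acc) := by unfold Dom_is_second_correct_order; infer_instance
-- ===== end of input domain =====

-- B replaces A's recursion-with-pop(0) by one non-mutating pass over the zipped
-- lists (A mutates its list arguments; the equivalence is about the return value).

-- ===== PORT A =====
-- int(str(int(acc)) + str(right)): exact via PySem.Int.toChars / ofChars?;
-- ofChars? = none models the ValueError (excluded by Pre_), .getD 0 there.
def pyConcat (acc right : Int) : Int :=
  (PySem.Int.ofChars? (PySem.Int.toChars acc ++ PySem.Int.toChars right)).getD 0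

def is_second_correct_order (result : Int) (parts : List Int) (operators : List String) (acc : Int) : Bool :=
  match parts with
  | [] => result == acc
  | right :: parts' =>
    match operators with
    | [] => false  -- operators.pop(0) raises IndexError here; excluded by Pre_
    | operator :: operators' =>
      let acc' :=
        if operator == "*" then acc * right
        else if operator == "+" then acc + right
        else if operator == "||" then pyConcat acc right
        else acc
      if acc' > result then false
      else if operators'.length == 0 then acc' == result
      else is_second_correct_order result parts' operators' acc'

-- ===== PORT B =====
-- the body of B's 'for i, (op, right) in enumerate(zip(operators, parts))' loop
def altLoop (result : Int) (nops : Int) (acc : Int) : List (Int × (String × Int)) → Bool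
  | [] => result == acc
  | (i, (op, right)) :: rest =>
    let acc' :=
      if op == "*" then acc * right
      else if op == "+" then acc + right
      else if op == "||" then pyConcat acc right
      else acc
    if acc' > result then false
    else if i + 1 == nops then acc' == result
    else altLoop result nops acc' rest

def is_second_correct_order_alt (result : Int) (parts : List Int) (operators : List String) (acc : Int) : Bool :=
  if parts.length == 0 then result == acc
  else altLoop result (operators.length : Int) acc (PySem.List.enumerate (operators.zip parts) 0)

-- ===== PRECONDITION & SPEC =====
-- Pre_ excludes (a) parts nonempty with operators empty, where A raises IndexError, and
-- (b) inputs where some aligned ('||', negative part) pair exists, on which the reached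
-- '||' step makes A (and B) raise ValueError; this is slightly wider than the raising set
-- (an early exit can return before such a pair is reached — see the cite in claim.json).
def Pre_is_second_correct_order (result : Int) (parts : List Int) (operators : List String) (acc : Int) : Prop :=
  (parts = [] ∨ operators ≠ []) ∧ ∀ p ∈ operators.zip parts, p.1 = "||" → 0 ≤ p.2
instance (result : Int) (parts : List Int) (operators : List String) (acc : Int) : Decidable (Pre_is_second_correct_order result parts operators acc) := by unfold Pre_is_second_correct_order; infer_instance
def pvWitness_is_second_correct_order : Int × List Int × List String × Int := (15, [2, 5], ["+", "*"], 1)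

def Spec_is_second_correct_order (result : Int) (parts : List Int) (operators : List String) (acc : Int) (out : Bool) : Prop := out = is_second_correct_order_alt result parts operators acc
instance (result : Int) (parts : List Int) (operators : List String) (acc : Int) (out : Bool) : Decidable (Spec_is_second_correct_order result parts operators acc out) := by unfold Spec_is_second_correct_order; infer_instance

-- ===== CLAIM (what is proved, stated in full; the proofs are below) =====
def Claim_equal_is_second_correct_order : Prop := ∀ (result : Int) (parts : List Int) (operators : List String) (acc : Int), Dom_is_second_correct_order result parts operators acc → Pre_is_second_correct_order result parts operators acc → Spec_is_second_correct_order result parts operators acc (is_second_correct_order result parts operators acc)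
-- ===== LEMMAS AND PROOFS =====

-- Loop invariant: running B's loop body over enumerate (ops.zip parts) s, with
-- nops = s + ops.length, computes A's recursion, provided ops ≠ [] when parts ≠ [].
theorem altLoop_eq (result : Int) :
    ∀ (parts : List Int) (operators : List String) (acc : Int) (s : Int),
      (parts = [] ∨ operators ≠ []) →
      altLoop result (s + operators.length) acc
        (PySem.List.enumerate (operators.zip parts) s)
      = is_second_correct_order result parts operators acc := by
  intro parts
  induction parts with
  | nil =>
    intro operators acc s _
    simp [is_second_correct_order, altLoop]
  | cons right parts' ih =>
    intro operators acc s h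
    match operators with
    | [] => simp at h
    | operator :: operators' =>
      simp only [List.zip_cons_cons, PySem.List.enumerate_cons, altLoop,
        is_second_correct_order]
      have hlen : s + (((operator :: operators').length : Nat) : Int)
          = (s + 1) + ((operators'.length : Nat) : Int) := by
        simp only [List.length_cons]; push_cast; ring
      split_ifs <;>
        first
          | rfl
          | (exfalso; clear ih h; simp only [beq_iff_eq, List.length_cons] at *;
             push_cast at *; omega)
          | (rename_i hstop
             have hne : operators' ≠ [] := by
               intro hc; subst hc; simp_all
             rw [hlen, ih operators' _ (s + 1) (Or.inr hne)])

theorem is_second_correct_order_spec : Claim_equal_is_second_correct_order := by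
  intro result parts operators acc _ hpre
  unfold Spec_is_second_correct_order is_second_correct_order_alt
  split_ifs with h
  · have : parts = [] := by simpa using h
    subst this
    simp [is_second_correct_order]
  · have := altLoop_eq result parts operators acc 0 hpre.1
    simpa using this.symm
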